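-- pv_equiv track=rewrite | github.com/sublime-music/sublime-music | sublime/dbus_manager.py | get_dbus_playlist
-- ===== SOURCE A (Python) =====
-- from collections import defaultdict
-- from typing import Any, Callable, DefaultDict, Dict, List, Tuple
--
-- def get_dbus_playlist(play_queue: List[str]) -> List[str]:
--     seen_counts: DefaultDict[str, int] = defaultdict(int)
--     tracks = []
--     for song_id in play_queue:
--         id_ = seen_counts[song_id]
--         tracks.append(f'/song/{song_id}/{id_}')
--         seen_counts[song_id] += 1
--
--     return tracks
-- ===== SOURCE B (Python) =====
-- def get_dbus_playlist(play_queue):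
--     # Group the queue positions by song id, then scatter the numbered
--     # dbus paths into a preallocated output list.
--     positions = {}
--     for i, song_id in enumerate(play_queue):
--         positions.setdefault(song_id, []).append(i)
--     out = [''] * len(play_queue)
--     for song_id, idxs in positions.items():
--         for k, i in enumerate(idxs):
--             out[i] = f'/song/{song_id}/{k}'
--     return out
-- ===== Notes on version B (the rewrite author's own statement) =====
-- stated objective: alternative
-- what changed: Instead of A's single sequential pass with a running per-song counter, B first groups the queue positions by song id into a dict of index lists, then scatters the numbered '/song/<id>/<k>' paths out of order into a preallocated output list.
import Mathlib
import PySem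

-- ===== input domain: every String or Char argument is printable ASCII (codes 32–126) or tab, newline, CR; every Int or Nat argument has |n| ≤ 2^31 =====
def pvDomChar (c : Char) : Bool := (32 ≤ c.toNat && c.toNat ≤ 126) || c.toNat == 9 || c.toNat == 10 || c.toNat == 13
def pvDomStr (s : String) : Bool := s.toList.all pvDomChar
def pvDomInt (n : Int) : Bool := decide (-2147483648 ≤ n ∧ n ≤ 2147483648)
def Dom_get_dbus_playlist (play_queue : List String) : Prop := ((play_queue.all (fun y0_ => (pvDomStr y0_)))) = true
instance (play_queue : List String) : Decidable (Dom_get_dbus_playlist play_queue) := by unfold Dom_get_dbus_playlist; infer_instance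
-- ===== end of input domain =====

-- B groups the queue positions by song id into a dict of index lists and then scatters the
-- numbered '/song/<id>/<k>' paths out of order into a preallocated output list, instead of
-- A's single sequential pass with a running per-song counter (alternative decomposition).

-- ===== PORT A =====
-- seen_counts: defaultdict(int); seen_counts[song_id] reads 0 when absent, += 1 stores back:
-- ported as getD _ 0 then insert (the observable dict state is identical).
def get_dbus_playlist (play_queue : List String) : List String :=
  (play_queue.foldl
    (fun (st : PySem.Dict String Int × List String) song_id =>
      let id_ := st.1.getD song_id 0
      (st.1.insert song_id (id_ + 1),
       st.2 ++ ["/song/" ++ song_id ++ "/" ++ PySem.Int.toStr id_]))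
    (PySem.Dict.empty, [])).2

-- ===== PORT B =====
-- positions.setdefault(song_id, []).append(i) = positions[song_id] = positions.get(song_id, []) + [i],
-- i.e. Dict.modify song_id [] (· ++ [i]).  out[i] = v : every written index i comes from
-- enumerate(play_queue) so 0 ≤ i < len(out); List.set i.toNat is exact there (no IndexError).
def get_dbus_playlist_alt (play_queue : List String) : List String :=
  let positions :=
    (PySem.List.enumerate play_queue 0).foldl
      (fun (d : PySem.Dict String (List Int)) p => d.modify p.2 [] (· ++ [p.1]))
      PySem.Dict.empty
  let out := List.replicate play_queue.length ""
  positions.items.foldl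
    (fun out g =>
      (PySem.List.enumerate g.2 0).foldl
        (fun out p => out.set p.2.toNat ("/song/" ++ g.1 ++ "/" ++ PySem.Int.toStr p.1))
        out)
    out

-- ===== PRECONDITION & SPEC =====
def Spec_get_dbus_playlist (play_queue : List String) (out : List String) : Prop := out = get_dbus_playlist_alt play_queue
instance (play_queue : List String) (out : List String) : Decidable (Spec_get_dbus_playlist play_queue out) := by unfold Spec_get_dbus_playlist; infer_instance

-- ===== CLAIM (what is proved, stated in full; the proofs are below) =====
def Claim_equal_get_dbus_playlist : Prop := ∀ (play_queue : List String), Dom_get_dbus_playlist play_queue → Spec_get_dbus_playlist play_queue (get_dbus_playlist play_queue)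

-- ===== LEMMAS AND PROOFS =====

-- the canonical path of queue position j
def pvLabel (q : List String) (j : Nat) : String :=
  "/song/" ++ q.getD j "" ++ "/" ++ PySem.Int.toStr (((q.take j).count (q.getD j "") : Int))

-- reference: each song tagged with its count in the already-seen prefix `pre`
def pvRef (pre : List String) : List String → List String
  | [] => []
  | s :: t => ("/song/" ++ s ++ "/" ++ PySem.Int.toStr (pre.count s : Int)) :: pvRef (pre ++ [s]) t

lemma loopA (rest : List String) : ∀ (pre acc : List String),
    (rest.foldl
      (fun (st : PySem.Dict String Int × List String) song_id =>
        let id_ := st.1.getD song_id 0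
        (st.1.insert song_id (id_ + 1),
         st.2 ++ ["/song/" ++ song_id ++ "/" ++ PySem.Int.toStr id_]))
      (pre.foldl (fun d s => d.insert s (d.getD s 0 + 1)) PySem.Dict.empty, acc)).2
    = acc ++ pvRef pre rest := by
  induction rest with
  | nil => intro pre acc; simp [pvRef]
  | cons s t ih =>
    intro pre acc
    have hcnt : (pre.foldl (fun d s => d.insert s (d.getD s 0 + 1)) PySem.Dict.empty).getD s 0
        = (pre.count s : Int) := by
      simp [PySem.Dict.getD_foldl_insert_add_one, PySem.Dict.getD_empty]
    have hdict : (pre.foldl (fun d s => d.insert s (d.getD s 0 + 1)) PySem.Dict.empty).insert s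
          ((pre.count s : Int) + 1)
        = (pre ++ [s]).foldl (fun d s => d.insert s (d.getD s 0 + 1)) PySem.Dict.empty := by
      rw [← hcnt, List.foldl_append]; rfl
    simp only [List.foldl_cons, hcnt, pvRef]
    rw [hdict, ih (pre ++ [s])]
    simp

-- pvRef, indexed
lemma pvRef_eq_map_label (rest : List String) : ∀ (pre : List String),
    pvRef pre rest = (List.range rest.length).map (fun j =>
      "/song/" ++ rest.getD j "" ++ "/" ++
        PySem.Int.toStr (((pre ++ rest.take j).count (rest.getD j "") : Int))) := by
  induction rest with
  | nil => intro pre; simp [pvRef]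
  | cons s t ih =>
    intro pre
    rw [pvRef, List.length_cons, List.range_succ_eq_map, List.map_cons, List.map_map]
    congr 1
    · simp
    · rw [ih (pre ++ [s])]
      apply List.map_congr_left
      intro j hj
      simp [Nat.succ_eq_add_one, List.take_succ_cons]

lemma A_eq_labels (q : List String) :
    get_dbus_playlist q = (List.range q.length).map (pvLabel q) := by
  have h := loopA q [] []
  simp only [List.foldl_nil] at h
  unfold get_dbus_playlist
  rw [h, List.nil_append, pvRef_eq_map_label]
  simp [pvLabel]

-- the queue positions holding song s, in increasing order
def pvGrpN (q : List String) (s : String) : List Nat :=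
  (List.range q.length).filter (fun j => q.getD j "" == s)

lemma filter_range_getElem? (p : Nat → Bool) : ∀ (n k j : Nat),
    ((List.range n).filter p)[k]? = some j →
    ((List.range j).filter p).length = k ∧ p j = true ∧ j < n := by
  intro n
  induction n with
  | zero => intro k j h; simp at h
  | succ n ih =>
    intro k j h
    rw [List.range_succ, List.filter_append, List.getElem?_append] at h
    split at h
    · obtain ⟨h1, h2, h3⟩ := ih k j h
      exact ⟨h1, h2, by omega⟩
    · rename_i hk
      by_cases hp : p n
      · rw [show List.filter p [n] = [n] by simp [hp]] at h
        rw [List.getElem?_singleton] at h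
        split at h
        · rename_i hz
          obtain rfl : n = j := by simpa using h
          exact ⟨by omega, hp, by omega⟩
        · simp at h
      · rw [show List.filter p [n] = [] by simp [hp]] at h
        simp at h

lemma take_eq_map_range_getD (q : List String) (j : Nat) (hj : j ≤ q.length) :
    q.take j = (List.range j).map (fun i => q.getD i "") := by
  apply List.ext_getElem
  · simp [hj]
  · intro i h1 h2
    simp only [List.getElem_take, List.getElem_map, List.getElem_range]
    rw [List.getD_eq_getElem]

lemma count_take (q : List String) (s : String) (j : Nat) (hj : j ≤ q.length) :
    (q.take j).count s = ((List.range j).filter (fun i => q.getD i "" == s)).length := by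
  rw [List.count_eq_countP, take_eq_map_range_getD q j hj, List.countP_map,
    ← List.countP_eq_length_filter]
  rfl

-- the group list stored for song s in B's positions dict
lemma positions_getD (q : List String) (s : String) :
    ((PySem.List.enumerate q 0).foldl
      (fun (d : PySem.Dict String (List Int)) p => d.modify p.2 [] (· ++ [p.1]))
      PySem.Dict.empty).getD s []
    = (pvGrpN q s).map (fun (j : Nat) => (j : Int)) := by
  have hswap : (PySem.List.enumerate q 0).foldl
      (fun (d : PySem.Dict String (List Int)) p => d.modify p.2 [] (· ++ [p.1]))
      PySem.Dict.empty
      = ((PySem.List.enumerate q 0).map Prod.swap).foldl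
      (fun (d : PySem.Dict String (List Int)) p => d.modify p.1 [] (· ++ [p.2]))
      PySem.Dict.empty := by
    rw [List.foldl_map]
    rfl
  rw [hswap, PySem.Dict.getD_foldl_modify_append]
  rw [PySem.List.enumerate_eq_map_pyRange q "", PySem.List.len_eq, PySem.List.pyRange_zero_nat]
  simp only [PySem.Dict.getD_empty, List.nil_append, List.map_map, List.filter_map, pvGrpN,
    Function.comp_def, Prod.swap, PySem.List.pyGetD_natCast]

-- the flattened list of (position, path) writes B performs
def pvWrites (q : List String) : List (Nat × String) :=
  ((PySem.List.dedup q).map (fun s => (s, (pvGrpN q s).map (fun (j : Nat) => (j : Int))))).flatMap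
    (fun g => (PySem.List.enumerate g.2 0).map
      (fun p => (p.2.toNat, "/song/" ++ g.1 ++ "/" ++ PySem.Int.toStr p.1)))

-- every write stores the canonical path of its position, so write order is irrelevant
lemma scatter_getElem? (q : List String) (W : List (Nat × String)) : ∀ (out : List String) (j : Nat),
    (∀ w ∈ W, w.2 = pvLabel q w.1) →
    (W.foldl (fun o w => o.set w.1 w.2) out)[j]? =
      if j ∈ W.map (·.1) ∧ j < out.length then some (pvLabel q j) else out[j]? := by
  induction W with
  | nil => intro out j h; simp
  | cons w t ih =>
    intro out j h
    rw [List.foldl_cons, ih _ j (fun v hv => h v (List.mem_cons_of_mem _ hv))]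
    have hw1 : w.2 = pvLabel q w.1 := h w List.mem_cons_self
    rw [List.length_set]
    by_cases hmem : j ∈ t.map (·.1)
    · by_cases hj : j < out.length
      · simp [hmem, hj]
      · simp [hmem, hj]
    · by_cases hwj : w.1 = j
      · subst hwj
        by_cases hj : w.1 < out.length
        · simp [hmem, hj, hw1]
        · simp [hmem, hj]
      · have h1 : (out.set w.1 w.2)[j]? = out[j]? := by
          rw [List.getElem?_set_ne hwj]
        simp [hmem, h1, Ne.symm hwj]

lemma pvWrites_val (q : List String) :
    ∀ w ∈ pvWrites q, w.2 = pvLabel q w.1 := by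
  intro w hw
  unfold pvWrites at hw
  rw [List.mem_flatMap] at hw
  obtain ⟨g, hg, hwmem⟩ := hw
  rw [List.mem_map] at hg
  obtain ⟨s, _, rfl⟩ := hg
  rw [List.mem_map] at hwmem
  obtain ⟨p, hp, rfl⟩ := hwmem
  rw [PySem.List.mem_enumerate_iff] at hp
  obtain ⟨k, hk, rfl⟩ := hp
  rw [List.getElem_map]
  have hk' : k < (pvGrpN q s).length := by simpa using hk
  have hjget : ((List.range q.length).filter (fun i => q.getD i "" == s))[k]? = some ((pvGrpN q s)[k]'hk') :=
    List.getElem?_eq_getElem hk'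
  obtain ⟨hlen, hpred, hjlt⟩ := filter_range_getElem? _ _ _ _ hjget
  have hs : q.getD ((pvGrpN q s)[k]'hk') "" = s := by simpa using hpred
  have hcnt : (q.take ((pvGrpN q s)[k]'hk')).count s = k := by
    rw [count_take q s _ (by omega), hlen]
  simp only [pvLabel, Int.toNat_natCast, hs, hcnt]
  simp

lemma pvWrites_cover (q : List String) :
    ∀ j < q.length, j ∈ (pvWrites q).map (·.1) := by
  intro j hj
  have hsq : q.getD j "" ∈ q := by
    rw [List.getD_eq_getElem q "" hj]; exact List.getElem_mem hj
  have hjg : j ∈ pvGrpN q (q.getD j "") := by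
    simp [pvGrpN, List.mem_filter, List.mem_range, hj]
  obtain ⟨k, hk, hkj⟩ := List.mem_iff_getElem.mp hjg
  rw [List.mem_map]
  refine ⟨(j, "/song/" ++ q.getD j "" ++ "/" ++ PySem.Int.toStr (0 + (k:Int))), ?_, rfl⟩
  unfold pvWrites
  rw [List.mem_flatMap]
  refine ⟨(q.getD j "", (pvGrpN q (q.getD j "")).map (fun (j : Nat) => (j : Int))), ?_, ?_⟩
  · rw [List.mem_map]
    exact ⟨q.getD j "", by simpa using hsq, rfl⟩
  · rw [List.mem_map]
    refine ⟨((0:Int) + k, (j : Int)), ?_, by simp⟩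
    rw [PySem.List.mem_enumerate_iff]
    refine ⟨k, by simpa using hk, ?_⟩
    simp only [List.getElem_map, Prod.mk.injEq, true_and]
    exact_mod_cast congrArg (Nat.cast (R := Int)) hkj.symm

lemma B_eq_labels (q : List String) :
    get_dbus_playlist_alt q = (List.range q.length).map (pvLabel q) := by
  unfold get_dbus_playlist_alt
  have hnodup : ((PySem.List.enumerate q 0).foldl
      (fun (d : PySem.Dict String (List Int)) p => d.modify p.2 [] (· ++ [p.1]))
      PySem.Dict.empty).keys.Nodup :=
    PySem.Dict.nodup_keys_foldl_modify_key _ _ _ _ _ (by simp)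
  have hkeys : ((PySem.List.enumerate q 0).foldl
      (fun (d : PySem.Dict String (List Int)) p => d.modify p.2 [] (· ++ [p.1]))
      PySem.Dict.empty).keys = PySem.List.dedup q := by
    rw [PySem.Dict.keys_foldl_modify_key]
    simp [PySem.Set.update_nil_left]
  have hitems : ((PySem.List.enumerate q 0).foldl
      (fun (d : PySem.Dict String (List Int)) p => d.modify p.2 [] (· ++ [p.1]))
      PySem.Dict.empty).items
      = (PySem.List.dedup q).map (fun s => (s, (pvGrpN q s).map (fun (j : Nat) => (j : Int)))) := by
    rw [PySem.Dict.items_eq_map_keys _ hnodup [], hkeys]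
    exact List.map_congr_left (fun s _ => by rw [positions_getD])
  simp only [hitems]
  have hfun : (fun (out : List String) (g : String × List Int) =>
      (PySem.List.enumerate g.2 0).foldl
        (fun out p => out.set p.2.toNat ("/song/" ++ g.1 ++ "/" ++ PySem.Int.toStr p.1)) out)
      = fun out g => (((PySem.List.enumerate g.2 0).map
          (fun p => (p.2.toNat, "/song/" ++ g.1 ++ "/" ++ PySem.Int.toStr p.1))).foldl
          (fun o w => o.set w.1 w.2) out) := by
    funext out g
    rw [List.foldl_map]
  rw [hfun]
  have hflat : (pvWrites q).foldl (fun o w => o.set w.1 w.2) (List.replicate q.length "")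
      = ((PySem.List.dedup q).map (fun s => (s, (pvGrpN q s).map (fun (j : Nat) => (j : Int))))).foldl
          (fun out g => (((PySem.List.enumerate g.2 0).map
            (fun p => (p.2.toNat, "/song/" ++ g.1 ++ "/" ++ PySem.Int.toStr p.1))).foldl
            (fun o w => o.set w.1 w.2) out)) (List.replicate q.length "") :=
    List.foldl_flatMap
  rw [← hflat]
  apply List.ext_getElem?
  intro j
  rw [scatter_getElem? q _ _ j (pvWrites_val q)]
  by_cases hj : j < q.length
  · rw [if_pos ⟨pvWrites_cover q j hj, by simpa using hj⟩]
    rw [List.getElem?_map, List.getElem?_range hj]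
    rfl
  · rw [if_neg (by simp; omega)]
    rw [List.getElem?_eq_none_iff.mpr (by simpa using by omega),
      List.getElem?_eq_none_iff.mpr (by simpa using by omega)]

-- ===== VERDICT (by name: the statement is the Claim_ definition above) =====
theorem get_dbus_playlist_spec : Claim_equal_get_dbus_playlist := by
  intro q _
  unfold Spec_get_dbus_playlist
  rw [A_eq_labels, B_eq_labels]
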